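-- pv_equiv track=rewrite | github.com/Lucien950/Contests | CBOJ/exec/3.py | decomposeMod
-- ===== SOURCE A (Python) =====
-- def tenMods(power):
-- 	a = [3, 2, 6, 4, 5, 1]
-- 	return a[power%6 - 1]
--
-- def decomposeMod(n):
-- 	letters = str(n)
-- 	power = len(letters)-1
-- 	final = 0
-- 	for i in letters:
-- 		bits = int(i) % 7
-- 		bits *= tenMods(power)
-- 		final += bits
-- 		power -= 1
-- 	return final % 7
-- ===== SOURCE B (Python) =====
-- def decomposeMod(n):
-- 	acc = 0
-- 	for ch in str(n):
-- 		acc = (acc * 10 + int(ch)) % 7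
-- 	return acc
-- ===== Notes on version B (the rewrite author's own statement) =====
-- stated objective: simpler
-- what changed: Replaces A's power-of-ten residue lookup table (tenMods) and descending power index with Horner's rule maintaining a single running remainder, reduced modulo seven after each digit.
import Mathlib
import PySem

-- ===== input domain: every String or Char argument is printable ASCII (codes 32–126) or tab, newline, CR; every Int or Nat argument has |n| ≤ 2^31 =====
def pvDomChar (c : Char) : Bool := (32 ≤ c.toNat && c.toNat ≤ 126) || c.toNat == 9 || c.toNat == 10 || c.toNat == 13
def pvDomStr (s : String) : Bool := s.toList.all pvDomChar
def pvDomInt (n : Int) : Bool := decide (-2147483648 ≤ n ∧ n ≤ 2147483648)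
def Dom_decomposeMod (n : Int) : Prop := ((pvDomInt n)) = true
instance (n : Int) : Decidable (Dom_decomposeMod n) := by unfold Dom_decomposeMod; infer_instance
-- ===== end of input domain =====

-- B replaces A's power-of-ten residue table (tenMods) and descending power index with
-- Horner's rule: a single running remainder reduced modulo seven per digit (simpler, same cost).


-- ===== PORT A =====
-- a[power%6 - 1]: the index is always in range (power%6 ∈ [0,5], so index ∈ [-1,4] wraps
-- Python-style); the .getD 0 default is never reached.
def tenMods (power : Int) : Int :=
  let a : List Int := [3, 2, 6, 4, 5, 1]
  (PySem.List.pyGet? a (PySem.Int.mod power 6 - 1)).getD 0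

-- loop body of A; the Option state is none exactly where Python's int(i) raises ValueError
def stepA (st : Option (Int × Int)) (c : Char) : Option (Int × Int) :=
  match st with
  | none => none
  | some (power, final) =>
    match PySem.Int.ofChars? [c] with
    | none => none
    | some bits0 =>
      some (power - 1, final + PySem.Int.mod bits0 7 * tenMods power)

def decomposeMod (n : Int) : Int :=
  let letters := PySem.Int.toChars n
  let power : Int := (letters.length : Int) - 1
  match letters.foldl stepA (some (power, 0)) with
  | none => 0                                   -- Python raises here; excluded by Pre_
  | some (_, final) => PySem.Int.mod final 7

-- ===== PORT B =====
-- loop body of B (Horner mod 7); none exactly where int(ch) raises ValueError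
def stepB (acc : Option Int) (c : Char) : Option Int :=
  match acc, PySem.Int.ofChars? [c] with
  | some a, some d => some (PySem.Int.mod (a * 10 + d) 7)
  | _, _ => none

def decomposeMod_alt (n : Int) : Int :=
  ((PySem.Int.toChars n).foldl stepB (some 0)).getD 0   -- default never reached inside Pre_

-- ===== PRECONDITION & SPEC =====
-- Pre_: exactly the inputs where Python A returns; for negative n, str(n) starts with a minus sign and
-- int('-') raises ValueError.
def Pre_decomposeMod (n : Int) : Prop := 0 ≤ n
instance (n : Int) : Decidable (Pre_decomposeMod n) := by unfold Pre_decomposeMod; infer_instance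
def pvWitness_decomposeMod : Int := (35)

def Spec_decomposeMod (n : Int) (out : Int) : Prop := out = decomposeMod_alt n
instance (n : Int) (out : Int) : Decidable (Spec_decomposeMod n out) := by unfold Spec_decomposeMod; infer_instance

-- ===== CLAIM (what is proved, stated in full; the proofs are below) =====
def Claim_equal_decomposeMod : Prop := ∀ (n : Int), Dom_decomposeMod n → Pre_decomposeMod n → Spec_decomposeMod n (decomposeMod n)

-- ===== LEMMAS AND PROOFS =====

theorem foldl_stepA_none (cs : List Char) : cs.foldl stepA none = none := by
  induction cs with
  | nil => rfl
  | cons c cs ih => simpa [stepA] using ih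

theorem foldl_stepB_none (cs : List Char) : cs.foldl stepB none = none := by
  induction cs with
  | nil => rfl
  | cons c cs ih => simpa [stepB] using ih

-- tenMods k is 10^k mod 7 (the six-long table is one period of the residue cycle)
theorem tenMods_eq (m : Nat) : tenMods (m : Int) = (10 : Int) ^ m % 7 := by
  induction m using Nat.strong_induction_on with
  | _ m ih =>
    by_cases h : m < 6
    · interval_cases m <;> decide
    · have h6 : 6 ≤ m := Nat.le_of_not_lt h
      have hmod : m % 6 = (m - 6) % 6 := by omega
      have hm1 : PySem.Int.mod (m : Int) 6 = ((m % 6 : Nat) : Int) := by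
        exact_mod_cast PySem.Int.mod_natCast m 6
      have hm2 : PySem.Int.mod ((m - 6 : Nat) : Int) 6 = (((m - 6) % 6 : Nat) : Int) := by
        exact_mod_cast PySem.Int.mod_natCast (m - 6) 6
      have hstep : tenMods (m : Int) = tenMods ((m - 6 : Nat) : Int) := by
        simp only [tenMods, hm1, hm2, hmod]
      have hpow : (10 : Int) ^ m % 7 = (10 : Int) ^ (m - 6) % 7 := by
        have hme : m = (m - 6) + 6 := by omega
        rw [hme, pow_add, Int.mul_emod]
        norm_num [Int.emod_emod_of_dvd]
      rw [hstep, hpow, ih (m - 6) (by omega)]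

-- (x % 7) is congruent to x mod 7
theorem modeq7 (x : Int) : Int.ModEq 7 (x % 7) x := Int.emod_emod_of_dvd x dvd_rfl

-- main invariant: A's weighted sum agrees with B's Horner accumulator
theorem key (cs : List Char) (f a : Int)
    (hinv : f % 7 = a * 10 ^ cs.length % 7) (ha0 : 0 ≤ a) (ha7 : a < 7) :
    (match cs.foldl stepA (some ((cs.length : Int) - 1, f)) with
      | none => 0
      | some (_, final) => PySem.Int.mod final 7)
    = (cs.foldl stepB (some a)).getD 0 := by
  induction cs generalizing f a with
  | nil =>
    show PySem.Int.mod f 7 = a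
    simp only [List.length_nil, pow_zero, mul_one] at hinv
    rw [PySem.Int.mod_eq_emod_of_pos (by norm_num : (0:Int) < 7), hinv,
      Int.emod_eq_of_lt ha0 ha7]
  | cons c cs ih =>
    have hlen : ((c :: cs).length : Int) - 1 = (cs.length : Int) := by
      simp
    rw [List.foldl_cons, List.foldl_cons, hlen]
    cases hd : PySem.Int.ofChars? [c] with
    | none =>
      simp [stepA, stepB, hd, foldl_stepA_none, foldl_stepB_none]
    | some d =>
      simp only [stepA, stepB, hd]
      apply ih
      · -- new invariant: f + (d%7)*tenMods(|cs|) is ((a*10+d)%7) * 10^|cs| mod 7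
        rw [tenMods_eq, PySem.Int.mod_eq_emod_of_pos (by norm_num : (0:Int) < 7),
          PySem.Int.mod_eq_emod_of_pos (by norm_num : (0:Int) < 7)]
        have hinv' : Int.ModEq 7 f (a * 10 ^ (cs.length + 1)) := by
          simpa [List.length_cons] using hinv
        show Int.ModEq 7 (f + d % 7 * ((10:Int) ^ cs.length % 7))
          ((a * 10 + d) % 7 * 10 ^ cs.length)
        have e1 : Int.ModEq 7 (f + d % 7 * ((10:Int) ^ cs.length % 7))
            (a * 10 ^ (cs.length + 1) + d * 10 ^ cs.length) :=
          hinv'.add ((modeq7 d).mul (modeq7 ((10:Int) ^ cs.length)))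
        have e2 : Int.ModEq 7 ((a * 10 + d) % 7 * (10:Int) ^ cs.length)
            ((a * 10 + d) * 10 ^ cs.length) := (modeq7 (a * 10 + d)).mul_right _
        have e3 : a * 10 ^ (cs.length + 1) + d * 10 ^ cs.length
            = (a * 10 + d) * (10:Int) ^ cs.length := by ring
        exact (e1.trans (by rw [e3])).trans e2.symm
      · exact PySem.Int.mod_nonneg _ (by norm_num)
      · exact PySem.Int.mod_lt _ (by norm_num)

-- ===== VERDICT (by name: the statement is the Claim_ definition above) =====
theorem decomposeMod_spec : Claim_equal_decomposeMod := by
  intro n _ _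
  show decomposeMod n = decomposeMod_alt n
  unfold decomposeMod decomposeMod_alt
  exact key (PySem.Int.toChars n) 0 0 (by simp) le_rfl (by norm_num)
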